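-- pv_equiv track=rewrite | github.com/guiiids/RAGKA-v1r1 | feedback_dashboard_improved.py | determine_feedback_status
-- ===== SOURCE A (Python) =====
-- def determine_feedback_status(tags):
--     """Determine the feedback status based on tags."""
--     if not tags or len(tags) == 0:
--         return {
--             'status': 'Neutral',
--             'class': 'badge badge-gray'
--         }
--
--     # Check for positive feedback
--     positive_indicators = ['good', 'accurate', 'helpful', 'clear', 'looks good']
--     for tag in tags:
--         tag_lower = tag.lower()
--         for indicator in positive_indicators:
--             if indicator in tag_lower:
--                 return {
--                     'status': 'Positive',
--                     'class': 'badge badge-green'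
--                 }
--
--     # Check for negative feedback
--     negative_indicators = ['incorrect', 'wrong', 'bad', 'error', 'unclear', 'confusing', 'irrelevant']
--     for tag in tags:
--         tag_lower = tag.lower()
--         for indicator in negative_indicators:
--             if indicator in tag_lower:
--                 return {
--                     'status': 'Negative',
--                     'class': 'badge badge-red'
--                 }
--
--     # If no clear positive or negative indicators, check for specific categories
--     for tag in tags:
--         tag_lower = tag.lower()
--         if 'incomplete' in tag_lower:
--             return {
--                 'status': 'Incomplete',
--                 'class': 'badge badge-yellow'
--             }
--         elif 'data source quality' in tag_lower:
--             return {
--                 'status': 'Data Issue',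
--                 'class': 'badge badge-blue'
--             }
--         elif 'other issue' in tag_lower:
--             return {
--                 'status': 'Other Issue',
--                 'class': 'badge badge-blue'
--             }
--
--     # Default to neutral
--     return {
--         'status': 'Other',
--         'class': 'badge badge-blue'
--     }
-- ===== SOURCE B (Python) =====
-- def determine_feedback_status(tags):
--     """Determine the feedback status based on tags (single pass)."""
--     if not tags:
--         return {'status': 'Neutral', 'class': 'badge badge-gray'}
--     pos = False
--     neg = False
--     cat = None
--     for tag in tags:
--         t = tag.lower()
--         if any(ind in t for ind in ('good', 'accurate', 'helpful', 'clear', 'looks good')):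
--             pos = True
--         if any(ind in t for ind in ('incorrect', 'wrong', 'bad', 'error', 'unclear', 'confusing', 'irrelevant')):
--             neg = True
--         if cat is None:
--             if 'incomplete' in t:
--                 cat = ('Incomplete', 'badge badge-yellow')
--             elif 'data source quality' in t:
--                 cat = ('Data Issue', 'badge badge-blue')
--             elif 'other issue' in t:
--                 cat = ('Other Issue', 'badge badge-blue')
--     if pos:
--         return {'status': 'Positive', 'class': 'badge badge-green'}
--     if neg:
--         return {'status': 'Negative', 'class': 'badge badge-red'}
--     if cat is not None:
--         return {'status': cat[0], 'class': cat[1]}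
--     return {'status': 'Other', 'class': 'badge badge-blue'}
-- ===== Notes on version B (the rewrite author's own statement) =====
-- stated objective: alternative
-- what changed: Replaces A's three full scans over the tag list (positive, negative, then category) with one pass that lowercases each tag once and accumulates a positive flag, a negative flag and the first category match.
import Mathlib
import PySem

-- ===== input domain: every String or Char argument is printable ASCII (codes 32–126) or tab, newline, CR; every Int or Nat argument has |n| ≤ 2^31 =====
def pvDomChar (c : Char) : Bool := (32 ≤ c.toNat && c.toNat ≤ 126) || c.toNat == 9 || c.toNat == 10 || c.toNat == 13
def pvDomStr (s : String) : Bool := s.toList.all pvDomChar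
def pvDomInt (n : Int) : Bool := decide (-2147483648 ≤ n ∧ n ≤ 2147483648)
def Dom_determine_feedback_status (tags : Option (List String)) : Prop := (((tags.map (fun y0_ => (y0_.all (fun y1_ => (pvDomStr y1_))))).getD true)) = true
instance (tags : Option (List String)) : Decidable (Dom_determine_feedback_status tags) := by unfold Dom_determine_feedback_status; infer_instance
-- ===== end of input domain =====

-- B replaces A's three sequential scans with a single pass accumulating flags and the first category match (same return value on every input).


-- ===== PORT A =====
def pvNeutral : List (String × String) := [("status", "Neutral"), ("class", "badge badge-gray")]
def pvPositive : List (String × String) := [("status", "Positive"), ("class", "badge badge-green")]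
def pvNegative : List (String × String) := [("status", "Negative"), ("class", "badge badge-red")]
def pvOther : List (String × String) := [("status", "Other"), ("class", "badge badge-blue")]
def pvPosInd : List String := ["good", "accurate", "helpful", "clear", "looks good"]
def pvNegInd : List String := ["incorrect", "wrong", "bad", "error", "unclear", "confusing", "irrelevant"]

-- A's third loop (first tag matching a category, per-tag priority incomplete > data > other)
def pvCatLoop : List String → List (String × String)
  | [] => pvOther
  | t :: rest =>
    let tl := PySem.Str.lower t
    if PySem.Str.isIn "incomplete" tl then [("status", "Incomplete"), ("class", "badge badge-yellow")]
    else if PySem.Str.isIn "data source quality" tl then [("status", "Data Issue"), ("class", "badge badge-blue")]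
    else if PySem.Str.isIn "other issue" tl then [("status", "Other Issue"), ("class", "badge badge-blue")]
    else pvCatLoop rest

def determine_feedback_status (tags : Option (List String)) : List (String × String) :=
  match tags with
  | none => pvNeutral
  | some l =>
    if l.length = 0 then pvNeutral
    else if l.any (fun t => pvPosInd.any (fun i => PySem.Str.isIn i (PySem.Str.lower t))) then pvPositive
    else if l.any (fun t => pvNegInd.any (fun i => PySem.Str.isIn i (PySem.Str.lower t))) then pvNegative
    else pvCatLoop l

-- ===== PORT B =====
-- per-tag category match (intra-tag priority preserved)
def pvCatOf (tl : String) : Option (String × String) :=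
  if PySem.Str.isIn "incomplete" tl then some ("Incomplete", "badge badge-yellow")
  else if PySem.Str.isIn "data source quality" tl then some ("Data Issue", "badge badge-blue")
  else if PySem.Str.isIn "other issue" tl then some ("Other Issue", "badge badge-blue")
  else none

def pvStep (st : Bool × Bool × Option (String × String)) (tag : String) :
    Bool × Bool × Option (String × String) :=
  let t := PySem.Str.lower tag
  ( st.1 || pvPosInd.any (fun i => PySem.Str.isIn i t),
    st.2.1 || pvNegInd.any (fun i => PySem.Str.isIn i t),
    match st.2.2 with
    | some c => some c
    | none => pvCatOf t )

def determine_feedback_status_alt (tags : Option (List String)) : List (String × String) :=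
  match tags with
  | none => pvNeutral
  | some l =>
    if l.isEmpty then pvNeutral
    else
      let st := l.foldl pvStep (false, false, none)
      if st.1 then pvPositive
      else if st.2.1 then pvNegative
      else match st.2.2 with
        | some c => [("status", c.1), ("class", c.2)]
        | none => pvOther

-- ===== PRECONDITION & SPEC =====
def Spec_determine_feedback_status (tags : Option (List String)) (out : List (String × String)) : Prop := out = determine_feedback_status_alt tags
instance (tags : Option (List String)) (out : List (String × String)) : Decidable (Spec_determine_feedback_status tags out) := by unfold Spec_determine_feedback_status; infer_instance

-- ===== CLAIM (what is proved, stated in full; the proofs are below) =====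
def Claim_equal_determine_feedback_status : Prop := ∀ (tags : Option (List String)), Dom_determine_feedback_status tags → Spec_determine_feedback_status tags (determine_feedback_status tags)

-- ===== LEMMAS AND PROOFS =====

-- The single-pass fold computes exactly the three quantities A's three scans compute.
theorem pvFold_eq (l : List String) (p n : Bool) (c : Option (String × String)) :
    l.foldl pvStep (p, n, c) =
      ( p || l.any (fun t => pvPosInd.any (fun i => PySem.Str.isIn i (PySem.Str.lower t))),
        n || l.any (fun t => pvNegInd.any (fun i => PySem.Str.isIn i (PySem.Str.lower t))),
        match c with
        | some x => some x
        | none => l.findSome? (fun t => pvCatOf (PySem.Str.lower t)) ) := by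
  induction l generalizing p n c with
  | nil => cases c <;> simp
  | cons t rest ih =>
    simp only [List.foldl_cons, List.any_cons, List.findSome?_cons, pvStep, ih]
    cases c with
    | some x => simp [Bool.or_assoc]
    | none =>
      cases h : pvCatOf (PySem.Str.lower t) <;> simp [Bool.or_assoc]

-- A's category loop is the first per-tag category match, defaulting to Other.
theorem pvCatLoop_eq (l : List String) :
    pvCatLoop l =
      match l.findSome? (fun t => pvCatOf (PySem.Str.lower t)) with
      | some c => [("status", c.1), ("class", c.2)]
      | none => pvOther := by
  induction l with
  | nil => rfl
  | cons t rest ih =>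
    have hstep : pvCatLoop (t :: rest) =
        match pvCatOf (PySem.Str.lower t) with
        | some c => [("status", c.1), ("class", c.2)]
        | none => pvCatLoop rest := by
      simp only [pvCatLoop, pvCatOf]
      split_ifs <;> rfl
    rw [hstep, List.findSome?_cons]
    cases pvCatOf (PySem.Str.lower t) <;> simp [ih]

-- ===== VERDICT (by name: the statement is the Claim_ definition above) =====
theorem determine_feedback_status_spec : Claim_equal_determine_feedback_status := by
  unfold Claim_equal_determine_feedback_status
  intro tags _
  unfold Spec_determine_feedback_status determine_feedback_status determine_feedback_status_alt
  cases tags with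
  | none => rfl
  | some l =>
    cases l with
    | nil => rfl
    | cons t rest =>
      simp only [List.length_cons, List.isEmpty_cons, pvFold_eq, Bool.false_or]
      split_ifs <;> first | rfl | exact pvCatLoop_eq (t :: rest)
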